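-- pv_equiv track=rewrite | github.com/MauriceCalvert/andante | engine/diatonic_solver/constraints.py | check_unisons
-- ===== SOURCE A (Python) =====
-- def check_unisons(degrees: tuple[int | None, ...]) -> list[tuple[int, int]]:
--     """Check for unisons (same degree) between any voice pair.
--
--     Returns list of (voice1_idx, voice2_idx) pairs with unisons.
--     """
--     unisons: list[tuple[int, int]] = []
--     voice_count = len(degrees)
--
--     for i in range(voice_count):
--         for j in range(i + 1, voice_count):
--             if degrees[i] is not None and degrees[j] is not None:
--                 if degrees[i] == degrees[j]:
--                     unisons.append((i, j))
--
--     return unisons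
-- ===== SOURCE B (Python) =====
-- def check_unisons(degrees):
--     """Check for unisons (same degree) between any voice pair.
--
--     Returns list of (voice1_idx, voice2_idx) pairs with unisons.
--     """
--     groups = {}
--     for idx, deg in enumerate(degrees):
--         if deg is not None:
--             groups.setdefault(deg, []).append(idx)
--     unisons = []
--     for idx, deg in enumerate(degrees):
--         if deg is not None:
--             unisons.extend((idx, j) for j in groups[deg] if j > idx)
--     return unisons
-- ===== Notes on version B (the rewrite author's own statement) =====
-- stated objective: alternative
-- what changed: Replaces A's all-pairs nested index loops by a one-pass hash index from degree to its sorted voice indices; each voice then pairs only with the later members of its own group, which preserves A's lexicographic output order without a sort.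
import Mathlib
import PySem

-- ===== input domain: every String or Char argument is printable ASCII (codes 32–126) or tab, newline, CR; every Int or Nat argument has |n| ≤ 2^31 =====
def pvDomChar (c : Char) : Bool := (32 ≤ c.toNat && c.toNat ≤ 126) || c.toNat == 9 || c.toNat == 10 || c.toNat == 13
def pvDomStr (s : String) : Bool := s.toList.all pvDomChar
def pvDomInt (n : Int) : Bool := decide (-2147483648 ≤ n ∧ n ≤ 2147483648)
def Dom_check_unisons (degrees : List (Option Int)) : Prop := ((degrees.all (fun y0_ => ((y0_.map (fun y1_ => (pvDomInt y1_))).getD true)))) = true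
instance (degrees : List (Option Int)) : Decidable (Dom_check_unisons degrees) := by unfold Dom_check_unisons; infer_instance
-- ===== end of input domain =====

-- B replaces A's all-pairs double loop by a degree→indices hash index built in one pass,
-- so each voice is compared only against the voices holding the same degree (objective: alternative).

-- ===== PORT A =====
def check_unisons (degrees : List (Option Int)) : List (Int × Int) :=
  let voice_count : Int := PySem.List.len degrees
  (PySem.List.pyRange 0 voice_count 1).foldl (fun unisons i =>
    (PySem.List.pyRange (i + 1) voice_count 1).foldl (fun unisons j =>
      if PySem.List.pyGetD degrees i none ≠ none ∧ PySem.List.pyGetD degrees j none ≠ none then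
        if PySem.List.pyGetD degrees i none = PySem.List.pyGetD degrees j none then
          unisons ++ [(i, j)]
        else unisons
      else unisons) unisons) []

-- ===== PORT B =====
-- 'groups.setdefault(deg, []).append(idx)' = modify deg (default []) (· ++ [idx])
def check_unisons_alt (degrees : List (Option Int)) : List (Int × Int) :=
  let groups : PySem.Dict Int (List Int) :=
    (PySem.List.enumerate degrees 0).foldl (fun g p =>
      match p.2 with
      | none => g
      | some d => g.modify d [] (· ++ [p.1])) PySem.Dict.empty
  (PySem.List.enumerate degrees 0).foldl (fun unisons p =>
    match p.2 with
    | none => unisons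
    | some d => unisons ++ ((groups.getD d []).filter (fun j => decide (p.1 < j))).map (fun j => (p.1, j))) []

-- ===== PRECONDITION & SPEC =====
def Spec_check_unisons (degrees : List (Option Int)) (out : List (Int × Int)) : Prop := out = check_unisons_alt degrees
instance (degrees : List (Option Int)) (out : List (Int × Int)) : Decidable (Spec_check_unisons degrees out) := by unfold Spec_check_unisons; infer_instance

-- ===== CLAIM (what is proved, stated in full; the proofs are below) =====
def Claim_equal_check_unisons : Prop := ∀ (degrees : List (Option Int)), Dom_check_unisons degrees → Spec_check_unisons degrees (check_unisons degrees)

-- ===== LEMMAS AND PROOFS =====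

-- the group-by loop: the bucket of degree d holds exactly the enumerated indices whose entry is 'some d'
lemma groups_getD (l : List (Option Int)) (s : Int) (g : PySem.Dict Int (List Int)) (d : Int) :
    ((PySem.List.enumerate l s).foldl (fun g p =>
        match p.2 with
        | none => g
        | some d => g.modify d [] (· ++ [p.1])) g).getD d []
      = g.getD d [] ++ ((PySem.List.enumerate l s).filter (fun p => p.2 == some d)).map (·.1) := by
  induction l generalizing s g with
  | nil => simp [PySem.List.enumerate_nil]
  | cons x l ih =>
    rw [PySem.List.enumerate_cons]
    cases x with
    | none => simp [ih]
    | some e =>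
      simp only [List.foldl_cons, List.filter_cons]
      rw [ih]
      by_cases he : e = d
      · subst he
        simp [PySem.Dict.getD_modify_self]
      · simp [PySem.Dict.getD_modify, he, Ne.symm he]

lemma flatMap_congr' {α β : Type} {l : List α} {f g : α → List β}
    (h : ∀ a ∈ l, f a = g a) : l.flatMap f = l.flatMap g := by
  induction l with
  | nil => rfl
  | cons x l ih => simp_all [List.flatMap_cons]

-- A's inner loop, over an arbitrary index list
lemma innerA (degrees : List (Option Int)) (i : Int) (l : List Int) (u : List (Int × Int)) :
    l.foldl (fun unisons j =>
      if PySem.List.pyGetD degrees i none ≠ none ∧ PySem.List.pyGetD degrees j none ≠ none then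
        if PySem.List.pyGetD degrees i none = PySem.List.pyGetD degrees j none then
          unisons ++ [(i, j)]
        else unisons
      else unisons) u
    = u ++ (l.filter (fun j => decide (PySem.List.pyGetD degrees j none = PySem.List.pyGetD degrees i none ∧ PySem.List.pyGetD degrees i none ≠ none))).map (fun j => (i, j)) := by
  induction l generalizing u with
  | nil => simp
  | cons x l ih =>
    simp only [List.foldl_cons, List.filter_cons]
    rw [ih]
    split_ifs <;> simp_all

-- B's emission loop, over an arbitrary enumerated list
lemma outerB (G : Int → List Int) (l : List (Int × Option Int)) (u : List (Int × Int)) :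
    l.foldl (fun unisons p =>
      match p.2 with
      | none => unisons
      | some d => unisons ++ ((G d).filter (fun j => decide (p.1 < j))).map (fun j => (p.1, j))) u
    = u ++ l.flatMap (fun p =>
      match p.2 with
      | none => []
      | some d => ((G d).filter (fun j => decide (p.1 < j))).map (fun j => (p.1, j))) := by
  induction l generalizing u with
  | nil => simp
  | cons x l ih =>
    obtain ⟨a, b⟩ := x
    cases b <;> simp [ih]

-- ===== VERDICT =====
theorem check_unisons_spec : Claim_equal_check_unisons := by
  intro degrees _
  unfold Spec_check_unisons check_unisons check_unisons_alt
  simp only [innerA, PySem.List.foldl_append_eq_flatMap]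
  simp only [outerB]
  simp only [groups_getD, PySem.Dict.getD_empty, List.nil_append]
  simp only [PySem.List.enumerate_eq_map_pyRange degrees none, List.flatMap_map,
    List.filter_map, List.map_map, Function.comp_def, List.map_id']
  apply flatMap_congr'
  intro i hi
  rw [PySem.List.mem_pyRange_one] at hi
  cases hDi : PySem.List.pyGetD degrees i none with
  | none => simp
  | some d =>
    dsimp only
    rw [List.filter_filter,
      PySem.List.pyRange_one_append 0 (i + 1) (PySem.List.len degrees) (by omega) (by omega),
      List.filter_append]
    have h1 : (PySem.List.pyRange 0 (i + 1)).filter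
        (fun j => decide (i < j) && (PySem.List.pyGetD degrees j none == some d)) = [] := by
      apply List.filter_eq_nil_iff.mpr
      intro j hj
      rw [PySem.List.mem_pyRange_one] at hj
      simp
      omega
    have h2 : (PySem.List.pyRange (i + 1) (PySem.List.len degrees)).filter
        (fun j => decide (i < j) && (PySem.List.pyGetD degrees j none == some d))
        = (PySem.List.pyRange (i + 1) (PySem.List.len degrees)).filter
          (fun j => decide (PySem.List.pyGetD degrees j none = some d ∧ some d ≠ none)) := by
      apply List.filter_congr
      intro j hj
      rw [PySem.List.mem_pyRange_one] at hj
      have hij : i < j := by omega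
      cases PySem.List.pyGetD degrees j none with
      | none => simp [hij]
      | some e => by_cases he : e = d <;> simp [hij, he]
    rw [h1, h2, List.nil_append]
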